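-- pv_equiv track=rewrite | github.com/KalaHarshal/DAA | DAA/StepCount.py | sum_with_steps
-- ===== SOURCE A (Python) =====
-- def sum_with_steps(A):
--     n = len(A)
--     step = 0
--
--     step += 1
--
--     total = 0
--     step += 1
--
--
--     for i in range(n):
--         step += 1
--
--         total = total + A[i]
--         step += 2
--
--
--     step += 1
--
--
--     step += 1
--
--     return total, step
-- ===== SOURCE B (Python) =====
-- def sum_with_steps(A):
--     # closed form: total = sum(A); step counter = 3*len(A) + 4 by tracing A
--     return sum(A), 3 * len(A) + 4
-- ===== Notes on version B (the rewrite author's own statement) =====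
-- stated objective: simpler
-- what changed: Replaces the instrumented accumulation loop with the builtin sum and the closed-form step count 3*len(A)+4.
import Mathlib
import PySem

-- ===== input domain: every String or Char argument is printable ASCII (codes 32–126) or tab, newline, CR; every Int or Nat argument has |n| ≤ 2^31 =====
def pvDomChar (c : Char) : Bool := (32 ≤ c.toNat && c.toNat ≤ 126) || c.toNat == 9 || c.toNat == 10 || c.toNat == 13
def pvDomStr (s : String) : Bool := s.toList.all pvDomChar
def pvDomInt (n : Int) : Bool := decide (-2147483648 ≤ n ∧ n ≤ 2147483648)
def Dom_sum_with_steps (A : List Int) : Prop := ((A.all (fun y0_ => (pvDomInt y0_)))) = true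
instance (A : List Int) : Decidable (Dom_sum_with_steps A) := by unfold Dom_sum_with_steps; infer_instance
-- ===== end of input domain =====

-- B replaces A's instrumented accumulation loop by the builtin sum and the closed-form step count 3*len(A)+4 (simpler).

-- ===== PORT A =====
-- literal port: loop over range(n) carrying (total, step); A[i] is always in range, ported as pyGetD with default 0
def sum_with_steps (A : List Int) : Int × Int :=
  let n : Int := A.length
  let step : Int := 0
  let step := step + 1
  let total : Int := 0
  let step := step + 1
  let (total, step) :=
    (PySem.List.pyRange 0 n 1).foldl
      (fun (st : Int × Int) i =>
        let step := st.2 + 1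
        let total := st.1 + PySem.List.pyGetD A i 0
        let step := step + 2
        (total, step))
      (total, step)
  let step := step + 1
  let step := step + 1
  (total, step)

-- ===== PORT B =====
def sum_with_steps_alt (A : List Int) : Int × Int :=
  (A.sum, 3 * (A.length : Int) + 4)

-- ===== PRECONDITION & SPEC =====
def Spec_sum_with_steps (A : List Int) (out : Int × Int) : Prop := out = sum_with_steps_alt A
instance (A : List Int) (out : Int × Int) : Decidable (Spec_sum_with_steps A out) := by unfold Spec_sum_with_steps; infer_instance

-- ===== CLAIM (what is proved, stated in full; the proofs are below) =====
def Claim_equal_sum_with_steps : Prop := ∀ (A : List Int), Dom_sum_with_steps A → Spec_sum_with_steps A (sum_with_steps A)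

-- ===== LEMMAS AND PROOFS =====

theorem pv_fold_sum (A : List Int) (t s : Int) :
    A.foldl (fun (st : Int × Int) v => (st.1 + v, st.2 + 1 + 2)) (t, s)
      = (t + A.sum, s + 3 * A.length) := by
  induction A generalizing t s with
  | nil => simp
  | cons a as ih => simp [ih]; constructor <;> ring

theorem sum_with_steps_spec : Claim_equal_sum_with_steps := by
  intro A _
  unfold Spec_sum_with_steps sum_with_steps sum_with_steps_alt
  have h := PySem.List.foldl_pyRange_zero_pyGetD' A 0
      (fun (st : Int × Int) v => (st.1 + v, st.2 + 1 + 2)) (0, 2)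
  simp only [] at h ⊢
  norm_num at h ⊢
  rw [h, pv_fold_sum]
  simp; ring
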